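-- pv_equiv track=rewrite | github.com/MaitrikMakwana/PII-DATA-SANITIZATION | pii-engine/main.py | _csv_cell_spans
-- ===== SOURCE A (Python) =====
-- def _csv_cell_spans(line: str) -> list[tuple[int, int]]:
--     """Return (start, end) byte offsets for each cell in a CSV line."""
--     spans: list[tuple[int, int]] = []
--     start = 0
--     in_quotes = False
--     for i, ch in enumerate(line):
--         if ch == '"':
--             in_quotes = not in_quotes
--         elif ch == ',' and not in_quotes:
--             spans.append((start, i))
--             start = i + 1
--     spans.append((start, len(line)))
--     return spans
-- ===== SOURCE B (Python) =====
-- def _csv_cell_spans(line: str) -> list[tuple[int, int]]: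
--     """Return (start, end) byte offsets for each cell in a CSV line."""
--     # Split on quote characters: segments at even index lie outside quotes,
--     # so exactly their commas are cell delimiters; then pair consecutive cuts.
--     cuts = [-1]
--     pos = 0
--     for k, part in enumerate(line.split('"')):
--         if k % 2 == 0:
--             cuts += [pos + j for j, ch in enumerate(part) if ch == ',']
--         pos += len(part) + 1
--     cuts.append(len(line))
--     return [(a + 1, b) for a, b in zip(cuts, cuts[1:])]
-- ===== Notes on version B (the rewrite author's own statement) =====
-- stated objective: alternative
-- what changed: B replaces the quote-state character scan with a split on the quote character: even-indexed segments of the split lie outside quotes, so their commas (located by offset arithmetic over the segments) are exactly the cell delimiters, and spans are then built by pairing consecutive cut points -1, commas, len(line); there is no in_quotes flag and no per-character state machine.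
import Mathlib
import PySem

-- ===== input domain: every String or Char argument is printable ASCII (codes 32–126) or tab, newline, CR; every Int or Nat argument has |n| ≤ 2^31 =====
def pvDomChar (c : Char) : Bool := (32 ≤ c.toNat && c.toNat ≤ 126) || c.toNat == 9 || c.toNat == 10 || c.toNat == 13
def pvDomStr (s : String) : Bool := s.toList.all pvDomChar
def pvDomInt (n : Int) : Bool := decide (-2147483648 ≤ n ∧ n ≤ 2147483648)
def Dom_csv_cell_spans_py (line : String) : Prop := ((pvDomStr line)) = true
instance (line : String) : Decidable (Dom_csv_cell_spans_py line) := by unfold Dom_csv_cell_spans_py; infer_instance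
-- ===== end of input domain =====

-- B finds delimiters by splitting the line on the quote character (even-indexed segments lie outside quotes, their commas are the cuts) instead of a quote-state scan; alternative decomposition, same O(n) cost.


-- ===== PORT A =====
-- state: (spans, start, in_quotes)
def pvStepA (st : List (Int × Int) × Int × Bool) (p : Int × Char) : List (Int × Int) × Int × Bool :=
  if p.2 = '"' then (st.1, st.2.1, !st.2.2)
  else if p.2 = ',' ∧ st.2.2 = false then (st.1 ++ [(st.2.1, p.1)], p.1 + 1, st.2.2)
  else st

def csv_cell_spans_py (line : String) : List (Int × Int) :=
  let cs := line.toList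
  let r := (PySem.List.enumerate cs 0).foldl pvStepA ([], 0, false)
  r.1 ++ [(r.2.1, (cs.length : Int))]

-- ===== PORT B =====
-- state: (cuts, pos); one step per part of line.split('"')
def pvCollect (st : List Int × Int) (p : Int × List Char) : List Int × Int :=
  ((if p.1 % 2 = 0 then
      st.1 ++ (PySem.List.enumerate p.2 0).filterMap (fun q => if q.2 = ',' then some (st.2 + q.1) else none)
    else st.1),
   st.2 + (p.2.length : Int) + 1)

def csv_cell_spans_py_alt (line : String) : List (Int × Int) :=
  let cs := line.toList
  let r := (PySem.List.enumerate (PySem.Chars.splitOn cs ['"']) 0).foldl pvCollect ([-1], 0)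
  let cuts := r.1 ++ [(cs.length : Int)]
  (cuts.zip cuts.tail).map (fun p => (p.1 + 1, p.2))

-- ===== PRECONDITION & SPEC =====
def Spec_csv_cell_spans_py (line : String) (out : List (Int × Int)) : Prop := out = csv_cell_spans_py_alt line
instance (line : String) (out : List (Int × Int)) : Decidable (Spec_csv_cell_spans_py line out) := by unfold Spec_csv_cell_spans_py; infer_instance

-- ===== CLAIM (what is proved, stated in full; the proofs are below) =====
def Claim_equal_csv_cell_spans_py : Prop := ∀ (line : String), Dom_csv_cell_spans_py line → Spec_csv_cell_spans_py line (csv_cell_spans_py line)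

-- ===== LEMMAS AND PROOFS =====
-- the common intermediate form: the indices of commas outside quotes
def pvCommaIdx : List Char → Int → Bool → List Int
  | [], _, _ => []
  | ch :: rest, i, inq =>
    if ch = '"' then pvCommaIdx rest (i + 1) (!inq)
    else if ch = ',' ∧ inq = false then i :: pvCommaIdx rest (i + 1) inq
    else pvCommaIdx rest (i + 1) inq

-- the pairing pass, as a recursion on the cut list (head = previous cut)
def pvPairs (c : Int) : List Int → List (Int × Int)
  | [] => []
  | x :: l => (c + 1, x) :: pvPairs x l

theorem pvPairs_eq_zip (c : Int) (l : List Int) :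
    ((c :: l).zip (c :: l).tail).map (fun p => (p.1 + 1, p.2)) = pvPairs c l := by
  induction l generalizing c with
  | nil => rfl
  | cons x l ih => simpa [pvPairs, List.zip] using ih x

-- A's fold equals comma indices plus pairing
theorem pvMain (l : List Char) (i : Int) (q : Bool) (s : Int) (acc : List (Int × Int)) (fin : Int) :
    (let r := (PySem.List.enumerate l i).foldl pvStepA (acc, s, q)
     r.1 ++ [(r.2.1, fin)]) = acc ++ pvPairs (s - 1) (pvCommaIdx l i q ++ [fin]) := by
  induction l generalizing i q s acc with
  | nil =>
    simp [PySem.List.enumerate_nil, pvCommaIdx, pvPairs]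
  | cons ch rest ih =>
    rw [PySem.List.enumerate_cons]
    by_cases hq : ch = '"'
    · simp only [List.foldl_cons, pvStepA, hq, pvCommaIdx]
      simpa using ih (i + 1) (!q) s acc
    · by_cases hc : ch = ',' ∧ q = false
      · simp only [List.foldl_cons, pvStepA, if_neg hq, if_pos hc, pvCommaIdx]
        have h := ih (i + 1) q (i + 1) (acc ++ [(s, i)])
        have h1 : i + 1 - 1 = i := by ring
        have h2 : s - 1 + 1 = s := by ring
        rw [h, h1]
        simp only [List.cons_append, pvPairs, h2, List.append_assoc, List.nil_append]
      · simp only [List.foldl_cons, pvStepA, if_neg hq, if_neg hc, pvCommaIdx,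
          if_neg hq, if_neg hc]
        exact ih (i + 1) q s acc

-- str.split('"'), as a structural recursion
def splitQ : List Char → List (List Char)
  | [] => [[]]
  | c :: rest => if c = '"' then [] :: splitQ rest else (splitQ rest).modifyHead (c :: ·)

theorem modifyHead_id' {α : Type} (l : List α) : l.modifyHead (fun x => x) = l := by
  cases l <;> rfl

theorem splitQ_ne_nil (l : List Char) : splitQ l ≠ [] := by
  induction l with
  | nil => simp [splitQ]
  | cons c rest ih =>
    simp only [splitQ]
    split_ifs
    · simp
    · cases h : splitQ rest with
      | nil => exact absurd h ih
      | cons a t => simp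

theorem go_eq (l : List Char) : ∀ (fuel : Nat) (cur : List Char) (acc : List (List Char)),
    l.length ≤ fuel →
    PySem.Chars.splitOn.go ['"'] fuel l cur acc
      = acc.reverse ++ (splitQ l).modifyHead (cur.reverse ++ ·) := by
  induction l with
  | nil =>
    intro fuel cur acc h
    cases fuel <;> simp [PySem.Chars.splitOn.go, splitQ]
  | cons c rest ih =>
    intro fuel cur acc h
    simp only [List.length_cons] at h
    cases fuel with
    | zero => omega
    | succ f =>
      rw [PySem.Chars.splitOn.go]
      by_cases hc : c = '"'
      · subst hc
        simp only [List.isPrefixOf, BEq.rfl, Bool.true_and, if_pos]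
        simp only [List.length_cons, List.length_nil, List.drop_succ_cons, List.drop_zero]
        rw [ih f [] (cur.reverse :: acc) (by omega)]
        simp [splitQ, modifyHead_id']
      · have hpf : (['"'].isPrefixOf (c :: rest)) = false := by
          simp [List.isPrefixOf]
          exact fun h => absurd h.symm hc
        rw [if_neg (by simp [hpf])]
        rw [ih f (c :: cur) acc (by omega)]
        simp only [splitQ, if_neg hc, List.modifyHead_modifyHead]
        congr 2
        ext x
        simp

theorem splitOn_quote (cs : List Char) : PySem.Chars.splitOn cs ['"'] = splitQ cs := by
  rw [PySem.Chars.splitOn, go_eq cs (cs.length + 1) [] [] (by omega)]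
  cases h : splitQ cs with
  | nil => exact absurd h (splitQ_ne_nil cs)
  | cons a t => simp

-- commas of a quote-free segment, at absolute positions
def pvCommas : List Char → Int → List Int
  | [], _ => []
  | c :: t, pos => if c = ',' then pos :: pvCommas t (pos + 1) else pvCommas t (pos + 1)

theorem pvCommas_enum (l : List Char) : ∀ (i pos : Int),
    (PySem.List.enumerate l i).filterMap (fun q => if q.2 = ',' then some (pos + q.1) else none)
      = pvCommas l (pos + i) := by
  induction l with
  | nil => intro i pos; simp [PySem.List.enumerate_nil, pvCommas]
  | cons c t ih =>
    intro i pos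
    rw [PySem.List.enumerate_cons]
    by_cases hc : c = ','
    · simp only [List.filterMap_cons, hc, if_pos rfl, pvCommas, ih (i + 1) pos]
      norm_num [add_assoc]
    · simp only [List.filterMap_cons, if_neg hc, pvCommas, ih (i + 1) pos]
      norm_num [add_assoc, if_neg hc]

theorem pvCommas_append (pre : List Char) (c : Char) : ∀ (pos : Int),
    pvCommas (pre ++ [c]) pos
      = pvCommas pre pos ++ (if c = ',' then [pos + (pre.length : Int)] else []) := by
  induction pre with
  | nil => intro pos; by_cases hc : c = ',' <;> simp [pvCommas, hc]
  | cons a t ih =>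
    intro pos
    by_cases ha : a = ','
    · simp only [List.cons_append, pvCommas, if_pos ha, ih (pos + 1)]
      simp [add_assoc, add_comm, add_left_comm]
    · simp only [List.cons_append, pvCommas, if_neg ha, ih (pos + 1)]
      simp [add_assoc, add_comm, add_left_comm]

theorem pvParityFlip (k : Int) : (decide ((k + 1) % 2 = 0)) = !(decide (k % 2 = 0)) := by
  by_cases h : k % 2 = 0
  · have : (k + 1) % 2 = 1 := by omega
    simp [h, this]
  · have : (k + 1) % 2 = 0 := by omega
    simp [h, this]

-- B's fold over the split segments equals the comma indices
theorem pvBMain (cs : List Char) : ∀ (k pos : Int) (pre : List Char) (acc : List Int),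
    ((PySem.List.enumerate ((splitQ cs).modifyHead (pre ++ ·)) k).foldl pvCollect (acc, pos)).1
      = acc ++ (if k % 2 = 0 then pvCommas pre pos else [])
            ++ pvCommaIdx cs (pos + (pre.length : Int)) (!(decide (k % 2 = 0))) := by
  induction cs with
  | nil =>
    intro k pos pre acc
    rw [show splitQ [] = [[]] from rfl]
    simp only [List.modifyHead, List.append_nil]
    rw [PySem.List.enumerate_cons, PySem.List.enumerate_nil]
    simp only [List.foldl_cons, List.foldl_nil, pvCollect, pvCommaIdx]
    rw [pvCommas_enum pre 0 pos]
    by_cases h : k % 2 = 0 <;> simp [h]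
  | cons c rest ih =>
    intro k pos pre acc
    by_cases hc : c = '"'
    · subst hc
      rw [show splitQ ('"' :: rest) = [] :: splitQ rest from rfl]
      simp only [List.modifyHead, List.append_nil]
      rw [PySem.List.enumerate_cons]
      simp only [List.foldl_cons, pvCollect]
      rw [pvCommas_enum pre 0 pos]
      have h0 : (splitQ rest).modifyHead ((([] : List Char)) ++ ·) = splitQ rest := by
        simpa using modifyHead_id' (splitQ rest)
      have h := ih (k + 1) (pos + (pre.length : Int) + 1) []
        (if k % 2 = 0 then acc ++ pvCommas pre (pos + 0) else acc)
      rw [h0] at h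
      rw [h]
      simp only [pvCommaIdx, if_pos rfl, pvParityFlip, List.length_nil]
      by_cases hk : k % 2 = 0 <;>
        simp [hk, pvCommas, List.append_assoc, add_assoc, add_comm, add_left_comm]
    · rw [show splitQ (c :: rest) = (splitQ rest).modifyHead (c :: ·) from if_neg hc]
      rw [List.modifyHead_modifyHead]
      have hcomp : ((pre ++ ·) ∘ (c :: ·)) = ((pre ++ [c]) ++ ·) := by
        ext x; simp
      rw [hcomp, ih k pos (pre ++ [c]) acc]
      simp only [pvCommas_append, List.length_append, List.length_cons, List.length_nil]
      by_cases hk : k % 2 = 0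
      · simp only [if_pos hk, pvCommaIdx, if_neg hc]
        by_cases hcm : c = ','
        · have hq : (!(decide (k % 2 = 0))) = false := by simp [hk]
          simp [hcm, hq, hk, List.append_assoc, add_assoc, add_comm, add_left_comm]
        · have : ¬ (c = ',' ∧ (!(decide (k % 2 = 0))) = false) := fun h => hcm h.1
          simp [hcm, this, hk, add_assoc, add_comm, add_left_comm]
      · have this : ¬ (c = ',' ∧ (!(decide (k % 2 = 0))) = false) := by
          rintro ⟨-, h2⟩; simp [hk] at h2
        simp [hk, pvCommaIdx, if_neg hc, this, add_assoc, add_comm, add_left_comm]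

theorem pvBMain0 (cs : List Char) (pos : Int) (acc : List Int) :
    ((PySem.List.enumerate (splitQ cs) 0).foldl pvCollect (acc, pos)).1
      = acc ++ pvCommaIdx cs pos false := by
  have h0 : (splitQ cs).modifyHead ((([] : List Char)) ++ ·) = splitQ cs := by
    simpa using modifyHead_id' (splitQ cs)
  have h := pvBMain cs 0 pos [] acc
  rw [h0] at h
  simpa [pvCommas] using h

-- ===== VERDICT (by name: the statement is the Claim_ definition above) =====
theorem csv_cell_spans_py_spec : Claim_equal_csv_cell_spans_py := by
  intro line _
  unfold Spec_csv_cell_spans_py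
  have hA := pvMain line.toList 0 false 0 [] ((line.toList.length : Int))
  have hB := pvBMain0 line.toList 0 [-1]
  simp only at hA
  simp only [csv_cell_spans_py, csv_cell_spans_py_alt, splitOn_quote]
  rw [hA, hB]
  simp only [List.append_assoc, List.singleton_append, List.cons_append, List.nil_append]
  have hz := pvPairs_eq_zip (-1) (pvCommaIdx line.toList 0 false ++ [(line.toList.length : Int)])
  rw [hz]
  norm_num
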